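-- pv_equiv track=rewrite | github.com/saitejakuchi/E9-241-Digital-Image-Processing-Assignments | Assignment1/utils.py | is_within_delta
-- ===== SOURCE A (Python) =====
-- def is_within_delta(prev_thres_data, curr_thres_data, next_thres_data, delta_value):
--     stable_threshold_data = []
--     for curr_thres_value in curr_thres_data:
--         prev_within_delta = False
--         next_within_delta = False
--         for prev_thres_value in prev_thres_data:
--             prev_within_delta = prev_within_delta or (
--                 abs(prev_thres_value[2] - curr_thres_value[2]) <= delta_value)
--         for next_thres_value in next_thres_data:
--             next_within_delta = next_within_delta or (
--                 abs(next_thres_value[2] - curr_thres_value[2]) <= delta_value)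
--         if prev_within_delta and next_within_delta:
--             stable_threshold_data.append(curr_thres_value)
--     return stable_threshold_data
-- ===== SOURCE B (Python) =====
-- def is_within_delta(prev_thres_data, curr_thres_data, next_thres_data, delta_value):
--     prev_vals = sorted(t[2] for t in prev_thres_data)
--     next_vals = sorted(t[2] for t in next_thres_data)
--
--     def has_in_range(vals, lo, hi):
--         # binary search: first index with vals[i] >= lo
--         a, b = 0, len(vals)
--         while a < b:
--             m = (a + b) // 2
--             if vals[m] < lo:
--                 a = m + 1
--             else:
--                 b = m
--         return a < len(vals) and vals[a] <= hi
--
--     return [t for t in curr_thres_data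
--             if has_in_range(prev_vals, t[2] - delta_value, t[2] + delta_value)
--             and has_in_range(next_vals, t[2] - delta_value, t[2] + delta_value)]
-- ===== Notes on version B (the rewrite author's own statement) =====
-- stated objective: faster
-- what changed: Instead of scanning all prev/next entries for every current threshold, B sorts the prev and next third-field values once and answers each per-current 'any value within delta' query with a hand-rolled binary search for the interval [c-delta, c+delta].
import Mathlib
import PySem

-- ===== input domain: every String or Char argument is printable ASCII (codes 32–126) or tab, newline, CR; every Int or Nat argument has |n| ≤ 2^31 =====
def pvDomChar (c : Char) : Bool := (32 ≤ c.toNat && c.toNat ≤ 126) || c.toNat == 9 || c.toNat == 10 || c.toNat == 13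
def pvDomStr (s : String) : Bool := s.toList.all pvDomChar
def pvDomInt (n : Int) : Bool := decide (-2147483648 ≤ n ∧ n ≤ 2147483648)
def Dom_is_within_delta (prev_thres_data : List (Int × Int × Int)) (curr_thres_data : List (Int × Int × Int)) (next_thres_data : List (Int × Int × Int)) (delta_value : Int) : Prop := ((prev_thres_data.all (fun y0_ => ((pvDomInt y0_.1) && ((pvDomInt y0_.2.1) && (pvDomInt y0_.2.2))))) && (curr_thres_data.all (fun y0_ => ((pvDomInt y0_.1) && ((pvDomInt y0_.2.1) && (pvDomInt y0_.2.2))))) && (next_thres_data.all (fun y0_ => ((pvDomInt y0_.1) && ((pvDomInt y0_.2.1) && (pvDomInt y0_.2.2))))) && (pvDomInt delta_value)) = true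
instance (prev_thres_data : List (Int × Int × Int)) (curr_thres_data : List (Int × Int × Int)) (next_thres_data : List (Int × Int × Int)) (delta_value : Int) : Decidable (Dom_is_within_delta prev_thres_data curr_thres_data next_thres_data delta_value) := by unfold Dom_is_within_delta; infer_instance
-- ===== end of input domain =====

-- B replaces A's per-current linear scans of prev/next by one sort of each third-field
-- list plus a binary-search range query per current element (objective: faster).

-- ===== PORT A =====
def is_within_delta (prev_thres_data : List (Int × Int × Int)) (curr_thres_data : List (Int × Int × Int)) (next_thres_data : List (Int × Int × Int)) (delta_value : Int) : List (Int × Int × Int) :=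
  curr_thres_data.foldl (fun stable_threshold_data curr_thres_value =>
    let prev_within_delta := prev_thres_data.foldl
      (fun acc prev_thres_value => acc || decide (|prev_thres_value.2.2 - curr_thres_value.2.2| ≤ delta_value)) false
    let next_within_delta := next_thres_data.foldl
      (fun acc next_thres_value => acc || decide (|next_thres_value.2.2 - curr_thres_value.2.2| ≤ delta_value)) false
    if prev_within_delta && next_within_delta then stable_threshold_data ++ [curr_thres_value]
    else stable_threshold_data) []

-- ===== PORT B =====
-- the while-loop of Source B's has_in_range (m is always in range, so getD m 0 is exactly vals[m])
def pvLbAux (vals : List Int) (lo : Int) (a b : Nat) : Nat :=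
  if _h : a < b then
    if vals.getD ((a + b) / 2) 0 < lo then pvLbAux vals lo ((a + b) / 2 + 1) b
    else pvLbAux vals lo a ((a + b) / 2)
  else a
termination_by b - a
decreasing_by all_goals omega

def pvHasInRange (vals : List Int) (lo hi : Int) : Bool :=
  let a := pvLbAux vals lo 0 vals.length
  decide (a < vals.length) && decide (vals.getD a 0 ≤ hi)

def is_within_delta_alt (prev_thres_data : List (Int × Int × Int)) (curr_thres_data : List (Int × Int × Int)) (next_thres_data : List (Int × Int × Int)) (delta_value : Int) : List (Int × Int × Int) :=
  let prev_vals := PySem.List.sorted (prev_thres_data.map (fun t => t.2.2)) (fun x => x)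
  let next_vals := PySem.List.sorted (next_thres_data.map (fun t => t.2.2)) (fun x => x)
  curr_thres_data.filter (fun t =>
    pvHasInRange prev_vals (t.2.2 - delta_value) (t.2.2 + delta_value) &&
    pvHasInRange next_vals (t.2.2 - delta_value) (t.2.2 + delta_value))

-- ===== PRECONDITION & SPEC =====
def Spec_is_within_delta (prev_thres_data : List (Int × Int × Int)) (curr_thres_data : List (Int × Int × Int)) (next_thres_data : List (Int × Int × Int)) (delta_value : Int) (out : List (Int × Int × Int)) : Prop := out = is_within_delta_alt prev_thres_data curr_thres_data next_thres_data delta_value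
instance (prev_thres_data : List (Int × Int × Int)) (curr_thres_data : List (Int × Int × Int)) (next_thres_data : List (Int × Int × Int)) (delta_value : Int) (out : List (Int × Int × Int)) : Decidable (Spec_is_within_delta prev_thres_data curr_thres_data next_thres_data delta_value out) := by unfold Spec_is_within_delta; infer_instance

-- ===== CLAIM (what is proved, stated in full; the proofs are below) =====
def Claim_equal_is_within_delta : Prop := ∀ (prev_thres_data : List (Int × Int × Int)) (curr_thres_data : List (Int × Int × Int)) (next_thres_data : List (Int × Int × Int)) (delta_value : Int), Dom_is_within_delta prev_thres_data curr_thres_data next_thres_data delta_value → Spec_is_within_delta prev_thres_data curr_thres_data next_thres_data delta_value (is_within_delta prev_thres_data curr_thres_data next_thres_data delta_value)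

-- ===== LEMMAS AND PROOFS =====

theorem pv_getD_mono (vals : List Int) (hs : vals.Pairwise (· ≤ ·)) {i j : Nat}
    (hij : i ≤ j) (hj : j < vals.length) : vals.getD i 0 ≤ vals.getD j 0 := by
  rcases Nat.eq_or_lt_of_le hij with h | h
  · subst h; exact le_refl _
  · rw [List.getD_eq_getElem vals 0 (lt_trans h hj), List.getD_eq_getElem vals 0 hj]
    exact List.pairwise_iff_getElem.mp hs i j (lt_trans h hj) hj h

theorem pvLbAux_spec (vals : List Int) (lo : Int) (a b : Nat)
    (hs : vals.Pairwise (· ≤ ·)) (hab : a ≤ b) (hb : b ≤ vals.length)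
    (hlt : ∀ i, i < a → vals.getD i 0 < lo)
    (hge : ∀ i, b ≤ i → i < vals.length → lo ≤ vals.getD i 0) :
    a ≤ pvLbAux vals lo a b ∧ pvLbAux vals lo a b ≤ b ∧
    (∀ i, i < pvLbAux vals lo a b → vals.getD i 0 < lo) ∧
    (∀ i, pvLbAux vals lo a b ≤ i → i < vals.length → lo ≤ vals.getD i 0) := by
  fun_induction pvLbAux vals lo a b with
  | case1 a b h hm ih =>
    obtain ⟨h1, h2, h3, h4⟩ := ih (by omega) hb
      (fun i hi => lt_of_le_of_lt (pv_getD_mono vals hs (by omega) (by omega)) hm)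
      hge
    exact ⟨by omega, h2, h3, h4⟩
  | case2 a b h hm ih =>
    obtain ⟨h1, h2, h3, h4⟩ := ih (by omega) (by omega) hlt
      (fun i hbi hi => le_trans (not_lt.mp hm) (pv_getD_mono vals hs (by omega) hi))
    exact ⟨h1, by omega, h3, h4⟩
  | case3 a b h =>
    exact ⟨le_refl a, by omega, hlt, fun i hai hil => hge i (by omega) hil⟩

theorem pvHasInRange_iff (vals : List Int) (lo hi : Int) (hs : vals.Pairwise (· ≤ ·)) :
    pvHasInRange vals lo hi = true ↔ ∃ x ∈ vals, lo ≤ x ∧ x ≤ hi := by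
  have hspec := pvLbAux_spec vals lo 0 vals.length hs (Nat.zero_le _) (le_refl _)
    (fun i hi => absurd hi (Nat.not_lt_zero i)) (fun i hi hi' => absurd hi' (by omega))
  set r := pvLbAux vals lo 0 vals.length with hr
  constructor
  · intro h
    simp only [pvHasInRange, Bool.and_eq_true, decide_eq_true_eq, ← hr] at h
    obtain ⟨hrl, hrh⟩ := h
    refine ⟨vals.getD r 0, ?_, hspec.2.2.2 r (le_refl r) hrl, hrh⟩
    rw [List.getD_eq_getElem vals 0 hrl]; exact List.getElem_mem hrl
  · rintro ⟨x, hx, hlox, hxhi⟩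
    obtain ⟨i, hil, hxi⟩ := List.mem_iff_getElem.mp hx
    have hri : r ≤ i := by
      by_contra hc
      have := hspec.2.2.1 i (by omega)
      rw [List.getD_eq_getElem vals 0 hil, hxi] at this; omega
    have hrl : r < vals.length := lt_of_le_of_lt hri hil
    have hv : vals.getD r 0 ≤ hi := by
      refine le_trans (le_trans (pv_getD_mono vals hs hri hil) ?_) hxhi
      rw [List.getD_eq_getElem vals 0 hil, hxi]
    simp only [pvHasInRange, Bool.and_eq_true, decide_eq_true_eq, ← hr]
    exact ⟨hrl, hv⟩

theorem pv_foldl_or (l : List (Int × Int × Int)) (f : (Int × Int × Int) → Bool) (b : Bool) :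
    l.foldl (fun acc x => acc || f x) b = (b || l.any f) := by
  induction l generalizing b with
  | nil => simp
  | cons x t ih => simp [List.foldl_cons, ih, Bool.or_assoc]

theorem pv_flag_iff (data : List (Int × Int × Int)) (c delta_value : Int) :
    (data.foldl (fun acc v => acc || decide (|v.2.2 - c| ≤ delta_value)) false = true
      ↔ pvHasInRange (PySem.List.sorted (data.map (fun t => t.2.2)) (fun x => x))
          (c - delta_value) (c + delta_value) = true) := by
  rw [pv_foldl_or, pvHasInRange_iff _ _ _
    (by simpa using PySem.List.sorted_pairwise (data.map (fun t => t.2.2)) (fun x => x))]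
  simp only [Bool.false_or, List.any_eq_true, decide_eq_true_eq]
  constructor
  · rintro ⟨v, hv, habs⟩
    have habs' := abs_le.mp habs
    refine ⟨v.2.2, ?_, by omega, by omega⟩
    rw [PySem.List.mem_sorted]; exact List.mem_map.mpr ⟨v, hv, rfl⟩
  · rintro ⟨x, hx, h1, h2⟩
    rw [PySem.List.mem_sorted] at hx
    obtain ⟨v, hv, rfl⟩ := List.mem_map.mp hx
    exact ⟨v, hv, abs_le.mpr ⟨by omega, by omega⟩⟩

-- ===== VERDICT (by name: the statement is the Claim_ definition above) =====
theorem is_within_delta_spec : Claim_equal_is_within_delta := by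
  intro prev curr next d _
  unfold Spec_is_within_delta is_within_delta is_within_delta_alt
  have h := PySem.List.foldl_append_if
    (fun c : Int × Int × Int =>
      (prev.foldl (fun acc v => acc || decide (|v.2.2 - c.2.2| ≤ d)) false) &&
      (next.foldl (fun acc v => acc || decide (|v.2.2 - c.2.2| ≤ d)) false))
    (fun x => x) curr []
  simp only [List.nil_append, List.map_id_fun', id] at h
  rw [h]
  refine List.filter_congr ?_
  intro c _
  rw [Bool.eq_iff_iff, Bool.and_eq_true, Bool.and_eq_true,
    pv_flag_iff prev c.2.2 d, pv_flag_iff next c.2.2 d]
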